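-- pv_equiv track=rewrite | github.com/ksahlin/isONcorrect | modules/correct_seqs.py | get_block_coverage2
-- ===== SOURCE A (Python) =====
-- def get_block_coverage2(read_alignment, ref_alignment, k, match_id):
--     ref_nucl_since_gap_open = 0
--     deteted_blocks = []
--     start_coord = 0
--     for i, (n1, n2) in enumerate(zip(read_alignment, ref_alignment)):
--         if n2 == "-":
--             continue
--         elif n1 == "-":
--             ref_nucl_since_gap_open +=1
--         else:
--             if ref_nucl_since_gap_open >= 10:
--                 deteted_blocks.append((start_coord, i))
--             ref_nucl_since_gap_open = 0
--             start_coord = i+1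
--
--     block_coverage = [ 1 for i in range(len(read_alignment))]
--     prev_stop = 0
--     for start, stop in deteted_blocks:
--         if start - prev_stop < 14:
--             start_pos = prev_stop
--         else:
--             start_pos = start
--
--         for i in range(start_pos, stop):
--             block_coverage[i] = 0
--         prev_stop = stop
--
--     return block_coverage
-- ===== SOURCE B (Python) =====
-- def get_block_coverage2(read_alignment, ref_alignment, k, match_id):
--     block_coverage = [1] * len(read_alignment)
--     ref_nucl_since_gap_open = 0
--     start_coord = 0
--     prev_stop = 0
--     for i, (n1, n2) in enumerate(zip(read_alignment, ref_alignment)):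
--         if n2 == "-":
--             continue
--         if n1 == "-":
--             ref_nucl_since_gap_open += 1
--             continue
--         if ref_nucl_since_gap_open >= 10:
--             start_pos = prev_stop if start_coord - prev_stop < 14 else start_coord
--             block_coverage = block_coverage[:start_pos] + [0] * (i - start_pos) + block_coverage[i:]
--             prev_stop = i
--         ref_nucl_since_gap_open = 0
--         start_coord = i + 1
--     return block_coverage
-- ===== Notes on version B (the rewrite author's own statement) =====
-- stated objective: simpler
-- what changed: B fuses A's two passes into a single scan: it drops the intermediate deteted_blocks list entirely and, when a gap block of >=10 reference nucleotides closes, immediately applies the merge-with-previous-block rule and zeroes the covered range by list splicing (cov[:lo] + [0]*(i-lo) + cov[i:]) instead of a per-index assignment loop in a second traversal.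
import Mathlib
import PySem

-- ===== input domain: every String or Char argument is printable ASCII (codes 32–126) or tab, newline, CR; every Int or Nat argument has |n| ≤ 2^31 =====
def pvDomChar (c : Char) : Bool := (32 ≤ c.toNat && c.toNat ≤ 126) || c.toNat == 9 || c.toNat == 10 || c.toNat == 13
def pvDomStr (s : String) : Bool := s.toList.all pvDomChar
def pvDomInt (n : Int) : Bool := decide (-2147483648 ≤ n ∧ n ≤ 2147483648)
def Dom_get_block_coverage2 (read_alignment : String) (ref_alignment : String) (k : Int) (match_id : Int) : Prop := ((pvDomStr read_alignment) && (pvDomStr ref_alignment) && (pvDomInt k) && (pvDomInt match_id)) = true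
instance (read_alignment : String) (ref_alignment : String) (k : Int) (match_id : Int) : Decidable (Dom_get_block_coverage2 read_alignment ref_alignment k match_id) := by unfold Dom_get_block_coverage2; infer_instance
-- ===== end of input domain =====

-- B fuses A's two passes into one scan that zeroes each merged block by list splicing as soon as
-- it closes, dropping the intermediate block list and the second traversal (objective: simpler).

-- ===== PORT A =====
-- first loop of A: state (ref_nucl_since_gap_open, deteted_blocks, start_coord)
def gbcStepA (st : Int × List (Int × Int) × Int) (p : Int × Char × Char) :
    Int × List (Int × Int) × Int :=
  let (run, blocks, sc) := st
  let (i, n1, n2) := p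
  if n2 = '-' then st
  else if n1 = '-' then (run + 1, blocks, sc)
  else
    let blocks := if run ≥ 10 then blocks ++ [(sc, i)] else blocks
    (0, blocks, i + 1)

-- second loop of A: state (block_coverage, prev_stop); inner loop assigns block_coverage[i] = 0
-- (pySetD is exact here: every assigned index is in range)
def gbcApplyA (st : List Int × Int) (b : Int × Int) : List Int × Int :=
  let (cov, ps) := st
  let (start, stop) := b
  let start_pos := if start - ps < 14 then ps else start
  ((PySem.List.pyRange start_pos stop 1).foldl (fun c i => PySem.List.pySetD c i 0) cov, stop)

def get_block_coverage2 (read_alignment : String) (ref_alignment : String) (k : Int) (match_id : Int) : List Int :=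
  let st := (PySem.List.enumerate (read_alignment.toList.zip ref_alignment.toList) 0).foldl gbcStepA (0, [], 0)
  let block_coverage := (PySem.List.pyRange 0 (PySem.List.len read_alignment.toList) 1).map (fun _ => (1 : Int))
  (st.2.1.foldl gbcApplyA (block_coverage, 0)).1

-- ===== PORT B =====
-- fused single pass of B: state (block_coverage, ref_nucl_since_gap_open, start_coord, prev_stop)
def gbcStepB (st : List Int × Int × Int × Int) (p : Int × Char × Char) :
    List Int × Int × Int × Int :=
  let (cov, run, sc, ps) := st
  let (i, n1, n2) := p
  if n2 = '-' then st
  else if n1 = '-' then (cov, run + 1, sc, ps)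
  else if run ≥ 10 then
    let start_pos := if sc - ps < 14 then ps else sc
    let cov := PySem.List.slice cov none (some start_pos)
               ++ PySem.List.pyRepeat [(0 : Int)] (i - start_pos)
               ++ PySem.List.slice cov (some i) none
    (cov, 0, i + 1, i)
  else (cov, 0, i + 1, ps)

def get_block_coverage2_alt (read_alignment : String) (ref_alignment : String) (k : Int) (match_id : Int) : List Int :=
  let cov0 := PySem.List.pyRepeat [(1 : Int)] (PySem.List.len read_alignment.toList)
  ((PySem.List.enumerate (read_alignment.toList.zip ref_alignment.toList) 0).foldl gbcStepB (cov0, 0, 0, 0)).1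

-- ===== PRECONDITION & SPEC =====
def Spec_get_block_coverage2 (read_alignment : String) (ref_alignment : String) (k : Int) (match_id : Int) (out : List Int) : Prop := out = get_block_coverage2_alt read_alignment ref_alignment k match_id
instance (read_alignment : String) (ref_alignment : String) (k : Int) (match_id : Int) (out : List Int) : Decidable (Spec_get_block_coverage2 read_alignment ref_alignment k match_id out) := by unfold Spec_get_block_coverage2; infer_instance

-- ===== CLAIM (what is proved, stated in full; the proofs are below) =====
def Claim_equal_get_block_coverage2 : Prop := ∀ (read_alignment : String) (ref_alignment : String) (k : Int) (match_id : Int), Dom_get_block_coverage2 read_alignment ref_alignment k match_id → Spec_get_block_coverage2 read_alignment ref_alignment k match_id (get_block_coverage2 read_alignment ref_alignment k match_id)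

-- ===== LEMMAS AND PROOFS =====

-- the inner assignment loop of A's second pass is the take/replicate/drop splice
lemma zeroLoop_eq_splice (n : Nat) : ∀ (cov : List Int) (lo stop : Int),
    n = (stop - lo).toNat → 0 ≤ lo → lo ≤ stop → stop ≤ (cov.length : Int) →
    (PySem.List.pyRange lo stop 1).foldl (fun c i => PySem.List.pySetD c i 0) cov
      = cov.take lo.toNat ++ List.replicate (stop - lo).toNat 0 ++ cov.drop stop.toNat := by
  induction n with
  | zero =>
    intro cov lo stop hn h0 h1 h2
    have hls : lo = stop := by omega
    subst hls
    rw [PySem.List.pyRange_one_eq_nil (le_refl lo)]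
    simp
  | succ m ih =>
    intro cov lo stop hn h0 h1 h2
    have hlt : lo < stop := by omega
    rw [PySem.List.pyRange_one_cons hlt]
    simp only [List.foldl_cons]
    rw [PySem.List.pySetD_of_nonneg cov (0 : Int) h0]
    have hlen : (cov.set lo.toNat 0).length = cov.length := by simp
    rw [ih (cov.set lo.toNat 0) (lo + 1) stop (by omega) (by omega) (by omega)
      (by rw [hlen]; omega)]
    have hloN : lo.toNat < cov.length := by omega
    have hsetform : cov.set lo.toNat 0 = cov.take lo.toNat ++ 0 :: cov.drop (lo.toNat + 1) := by
      rw [List.set_eq_take_append_cons_drop, if_pos hloN]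
    have htakelen : (cov.take lo.toNat).length = lo.toNat := by
      simp [List.length_take]; omega
    have htake : (cov.set lo.toNat 0).take (lo + 1).toNat = cov.take lo.toNat ++ [0] := by
      have h1' : (lo + 1).toNat = lo.toNat + 1 := by omega
      rw [h1', hsetform, List.take_append, htakelen]
      simp
    have hdrop : (cov.set lo.toNat 0).drop stop.toNat = cov.drop stop.toNat :=
      List.drop_set_of_lt (by omega)
    rw [htake, hdrop]
    have hrep : List.replicate (stop - lo).toNat (0 : Int)
        = 0 :: List.replicate (stop - (lo + 1)).toNat 0 := by
      have he : (stop - lo).toNat = (stop - (lo + 1)).toNat + 1 := by omega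
      rw [he, List.replicate_succ]
    rw [hrep]
    simp

-- the block list accumulated by A's first loop splits off its initial value
lemma stepA_acc_append : ∀ (l : List (Int × Char × Char)) (run : Int) (bs : List (Int × Int)) (sc : Int),
    l.foldl gbcStepA (run, bs, sc)
      = ((l.foldl gbcStepA (run, [], sc)).1,
         bs ++ (l.foldl gbcStepA (run, [], sc)).2.1,
         (l.foldl gbcStepA (run, [], sc)).2.2) := by
  intro l
  induction l with
  | nil => intro run bs sc; simp
  | cons p l ih =>
    intro run bs sc
    obtain ⟨i, n1, n2⟩ := p
    simp only [List.foldl_cons]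
    by_cases h2 : n2 = '-'
    · have e1 : gbcStepA (run, bs, sc) (i, n1, n2) = (run, bs, sc) := by
        simp [gbcStepA, h2]
      have e2 : gbcStepA (run, [], sc) (i, n1, n2) = (run, [], sc) := by
        simp [gbcStepA, h2]
      rw [e1, e2, ih run bs sc]
    · by_cases h1 : n1 = '-'
      · have e1 : gbcStepA (run, bs, sc) (i, n1, n2) = (run + 1, bs, sc) := by
          simp [gbcStepA, h2, h1]
        have e2 : gbcStepA (run, [], sc) (i, n1, n2) = (run + 1, [], sc) := by
          simp [gbcStepA, h2, h1]
        rw [e1, e2, ih (run + 1) bs sc]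
      · by_cases hr : run ≥ 10
        · have e1 : gbcStepA (run, bs, sc) (i, n1, n2) = (0, bs ++ [(sc, i)], i + 1) := by
            simp [gbcStepA, h2, h1, hr]
          have e2 : gbcStepA (run, [], sc) (i, n1, n2) = (0, [(sc, i)], i + 1) := by
            simp [gbcStepA, h2, h1, hr]
          rw [e1, e2, ih 0 (bs ++ [(sc, i)]) (i + 1), ih 0 [(sc, i)] (i + 1)]
          simp
        · have e1 : gbcStepA (run, bs, sc) (i, n1, n2) = (0, bs, i + 1) := by
            simp [gbcStepA, h2, h1, hr]
          have e2 : gbcStepA (run, [], sc) (i, n1, n2) = (0, [], i + 1) := by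
            simp [gbcStepA, h2, h1, hr]
          rw [e1, e2, ih 0 bs (i + 1)]

-- main fusion lemma: B's single pass computes exactly A's block list applied by A's second pass
lemma fuse_main : ∀ (zs : List (Char × Char)) (s : Int) (cov : List Int) (run sc ps : Int),
    0 ≤ ps → ps ≤ s → 0 ≤ sc → sc ≤ s → s + zs.length ≤ (cov.length : Int) →
    (PySem.List.enumerate zs s).foldl gbcStepB (cov, run, sc, ps)
      = ((((PySem.List.enumerate zs s).foldl gbcStepA (run, [], sc)).2.1.foldl gbcApplyA (cov, ps)).1,
         ((PySem.List.enumerate zs s).foldl gbcStepA (run, [], sc)).1,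
         ((PySem.List.enumerate zs s).foldl gbcStepA (run, [], sc)).2.2,
         (((PySem.List.enumerate zs s).foldl gbcStepA (run, [], sc)).2.1.foldl gbcApplyA (cov, ps)).2) := by
  intro zs
  induction zs with
  | nil => intro s cov run sc ps _ _ _ _ _; simp [PySem.List.enumerate]
  | cons z zs ih =>
    intro s cov run sc ps hps0 hpss hsc0 hscs hlen
    obtain ⟨c1, c2⟩ := z
    rw [PySem.List.enumerate_cons]
    simp only [List.foldl_cons]
    have hlen' : (s + 1) + (zs.length : Int) ≤ (cov.length : Int) := by
      simp only [List.length_cons] at hlen; push_cast at hlen ⊢; omega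
    by_cases h2 : c2 = '-'
    · have eB : gbcStepB (cov, run, sc, ps) (s, c1, c2) = (cov, run, sc, ps) := by
        simp [gbcStepB, h2]
      have eA : gbcStepA (run, [], sc) (s, c1, c2) = (run, [], sc) := by
        simp [gbcStepA, h2]
      rw [eB, eA]
      exact ih (s + 1) cov run sc ps hps0 (by omega) hsc0 (by omega) hlen'
    · by_cases h1 : c1 = '-'
      · have eB : gbcStepB (cov, run, sc, ps) (s, c1, c2) = (cov, run + 1, sc, ps) := by
          simp [gbcStepB, h2, h1]
        have eA : gbcStepA (run, [], sc) (s, c1, c2) = (run + 1, [], sc) := by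
          simp [gbcStepA, h2, h1]
        rw [eB, eA]
        exact ih (s + 1) cov (run + 1) sc ps hps0 (by omega) hsc0 (by omega) hlen'
      · by_cases hr : run ≥ 10
        · -- a block closes at index s
          set lo : Int := if sc - ps < 14 then ps else sc with hlo
          have hlo0 : 0 ≤ lo := by rw [hlo]; split <;> omega
          have hlos : lo ≤ s := by rw [hlo]; split <;> omega
          have hslen : s ≤ (cov.length : Int) := by
            simp only [List.length_cons] at hlen; push_cast at hlen; omega
          set cov' : List Int := cov.take lo.toNat ++ List.replicate (s - lo).toNat 0
              ++ cov.drop s.toNat with hcov'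
          have hclen : (cov'.length : Int) = (cov.length : Int) := by
            rw [hcov']
            simp [List.length_take, List.length_replicate, List.length_drop]
            omega
          have eB : gbcStepB (cov, run, sc, ps) (s, c1, c2) = (cov', 0, s + 1, s) := by
            by_cases hc : sc - ps < 14
            · have hlo' : lo = ps := by rw [hlo, if_pos hc]
              simp [gbcStepB, h2, h1, hr, hc, hcov', hlo',
                PySem.List.slice_to cov hps0,
                PySem.List.slice_from cov (show (0:Int) ≤ s by omega),
                PySem.List.pyRepeat_singleton]
            · have hlo' : lo = sc := by rw [hlo, if_neg hc]
              simp [gbcStepB, h2, h1, hr, hc, hcov', hlo',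
                PySem.List.slice_to cov hsc0,
                PySem.List.slice_from cov (show (0:Int) ≤ s by omega),
                PySem.List.pyRepeat_singleton]
          have eA : gbcStepA (run, [], sc) (s, c1, c2) = (0, [(sc, s)], s + 1) := by
            simp [gbcStepA, h2, h1, hr]
          have eApply : gbcApplyA (cov, ps) (sc, s) = (cov', s) := by
            by_cases hc : sc - ps < 14
            · have hlo' : lo = ps := by rw [hlo, if_pos hc]
              simp only [gbcApplyA]
              rw [if_pos hc,
                zeroLoop_eq_splice (s - ps).toNat cov ps s rfl hps0 (by omega) hslen,
                hcov', hlo']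
            · have hlo' : lo = sc := by rw [hlo, if_neg hc]
              simp only [gbcApplyA]
              rw [if_neg hc,
                zeroLoop_eq_splice (s - sc).toNat cov sc s rfl hsc0 (by omega) hslen,
                hcov', hlo']
          rw [eB, eA]
          rw [stepA_acc_append ((PySem.List.enumerate zs (s + 1))) 0 [(sc, s)] (s + 1)]
          simp only [List.singleton_append, List.foldl_cons, eApply]
          exact ih (s + 1) cov' 0 (s + 1) s (by omega) (by omega) (by omega) (by omega)
            (by rw [hclen]; exact hlen')
        · have eB : gbcStepB (cov, run, sc, ps) (s, c1, c2) = (cov, 0, s + 1, ps) := by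
            simp [gbcStepB, h2, h1, hr]
          have eA : gbcStepA (run, [], sc) (s, c1, c2) = (0, [], s + 1) := by
            simp [gbcStepA, h2, h1, hr]
          rw [eB, eA]
          exact ih (s + 1) cov 0 (s + 1) ps hps0 (by omega) (by omega) (by omega) hlen'

-- ===== VERDICT (by name: the statement is the Claim_ definition above) =====
theorem get_block_coverage2_spec : Claim_equal_get_block_coverage2 := by
  intro ra rf k mid _
  unfold Spec_get_block_coverage2
  set zs := ra.toList.zip rf.toList with hzs
  show (List.foldl gbcApplyA
      ((PySem.List.pyRange 0 (PySem.List.len ra.toList) 1).map (fun _ => (1 : Int)), 0)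
      (List.foldl gbcStepA (0, [], 0) (PySem.List.enumerate zs 0)).2.1).1
    = (List.foldl gbcStepB
      (PySem.List.pyRepeat [(1 : Int)] (PySem.List.len ra.toList), 0, 0, 0)
      (PySem.List.enumerate zs 0)).1
  have hcovA : (PySem.List.pyRange 0 (PySem.List.len ra.toList) 1).map (fun _ => (1 : Int))
      = List.replicate ra.toList.length 1 := by
    rw [PySem.List.len_eq, PySem.List.pyRange_one]
    simp [Function.comp_def, List.map_const']
  have hcovB : PySem.List.pyRepeat [(1 : Int)] (PySem.List.len ra.toList)
      = List.replicate ra.toList.length 1 := by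
    rw [PySem.List.len_eq, PySem.List.pyRepeat_singleton]
    simp
  have hziplen : (0 : Int) + (zs.length : Int)
      ≤ ((List.replicate ra.toList.length (1 : Int)).length : Int) := by
    rw [hzs]
    simp [List.length_zip]
  have hm := fuse_main zs 0 (List.replicate ra.toList.length 1) 0 0 0
    (le_refl 0) (le_refl 0) (le_refl 0) (le_refl 0) hziplen
  rw [hcovA, hcovB, hm]
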